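-- pv_equiv track=rewrite | github.com/RedHatInsights/insights-core | insights/parsers/lvm.py | find_warnings
-- ===== SOURCE A (Python) =====
-- def find_warnings(content):
--     """Look for lines containing warning/error/info strings instead of data."""
--     keywords = [
--         k.lower()
--         for k in [
--             "WARNING",
--             "Couldn't find device",
--             "Configuration setting",
--             "read failed",
--             "Was device resized?",
--             "Invalid argument",
--             "leaked on lvs",
--             "Checksum error",
--             "is exported",
--             "failed.",
--             "Invalid metadata",
--             "response failed",
--             "duplicate",
--             "not found",
--             "Missing device",
--             "Internal error",
--             "Input/output error",
--             "Incorrect metadata",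
--             "Cannot process volume",
--             "No such file or directory",
--             "Logging initialised",
--             "changed sizes",
--             "vsnprintf failed",
--             "write failed",
--             "correction failed",
--             "Failed to write",
--             "Couldn't read",
--             "marked missing",
--             "Attempt to close device",
--             "Ignoring supplied major",
--             "not match metadata",
--             "Reading VG",
--             "Error reading device"
--         ]
--     ]
--     for l in content:
--         lower = l.strip().lower()
--         # Avoid hitting keywords inside the data
--         if not lower.startswith("lvm2"):
--             if any(k in lower for k in keywords):
--                 yield l
-- ===== SOURCE B (Python) =====
-- # Alternative implementation: instead of one substring search per keyword
-- # (any(k in lower ...)), scan each line left to right once, using an index of the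
-- # keywords by their first character to know which keywords can match at a position.
--
-- _KEYWORDS = [
--     "warning",
--     "couldn't find device",
--     "configuration setting",
--     "read failed",
--     "was device resized?",
--     "invalid argument",
--     "leaked on lvs",
--     "checksum error",
--     "is exported",
--     "failed.",
--     "invalid metadata",
--     "response failed",
--     "duplicate",
--     "not found",
--     "missing device",
--     "internal error",
--     "input/output error",
--     "incorrect metadata",
--     "cannot process volume",
--     "no such file or directory",
--     "logging initialised",
--     "changed sizes",
--     "vsnprintf failed",
--     "write failed",
--     "correction failed",
--     "failed to write",
--     "couldn't read",
--     "marked missing",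
--     "attempt to close device",
--     "ignoring supplied major",
--     "not match metadata",
--     "reading vg",
--     "error reading device",
-- ]
--
-- # keywords indexed by first character
-- _BY_FIRST = {}
-- for _k in _KEYWORDS:
--     _BY_FIRST.setdefault(_k[0], []).append(_k)
--
--
-- def _scan(s):
--     """One left-to-right pass: try the keywords starting with s[i] at each i."""
--     for i, c in enumerate(s):
--         for k in _BY_FIRST.get(c, ()):
--             if s.startswith(k, i):
--                 return True
--     return False
--
--
-- def find_warnings(content):
--     """Look for lines containing warning/error/info strings instead of data."""
--     for l in content:
--         low = l.strip().lower()
--         # Avoid hitting keywords inside the data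
--         if not low.startswith("lvm2") and _scan(low):
--             yield l
-- ===== Notes on version B (the rewrite author's own statement) =====
-- stated objective: alternative
-- what changed: Replaced the per-keyword membership loop any(k in lower for k in keywords) with a single left-to-right scan of each line driven by a dict indexing the (pre-lowered) keywords by their first character: at each position only the keywords starting with that character are tried.
import Mathlib
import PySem

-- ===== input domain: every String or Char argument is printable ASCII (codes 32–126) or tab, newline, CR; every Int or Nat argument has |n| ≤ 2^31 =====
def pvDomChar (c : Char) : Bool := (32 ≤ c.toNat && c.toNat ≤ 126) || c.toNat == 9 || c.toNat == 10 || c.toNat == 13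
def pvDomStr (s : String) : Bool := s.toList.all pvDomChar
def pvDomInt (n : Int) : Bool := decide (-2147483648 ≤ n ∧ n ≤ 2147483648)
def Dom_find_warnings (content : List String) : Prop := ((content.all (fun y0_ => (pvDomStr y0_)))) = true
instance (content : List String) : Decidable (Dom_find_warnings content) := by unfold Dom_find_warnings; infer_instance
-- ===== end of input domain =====

-- B replaces the per-keyword substring loop by one left-to-right scan per line,
-- dispatching on a dict of keywords indexed by first character (alternative).

-- ===== PORT A =====
def pvKeywordsA : List String :=
  (["WARNING", "Couldn't find device", "Configuration setting", "read failed",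
    "Was device resized?", "Invalid argument", "leaked on lvs", "Checksum error",
    "is exported", "failed.", "Invalid metadata", "response failed", "duplicate",
    "not found", "Missing device", "Internal error", "Input/output error",
    "Incorrect metadata", "Cannot process volume", "No such file or directory",
    "Logging initialised", "changed sizes", "vsnprintf failed", "write failed",
    "correction failed", "Failed to write", "Couldn't read", "marked missing",
    "Attempt to close device", "Ignoring supplied major", "not match metadata",
    "Reading VG", "Error reading device"]).map PySem.Str.lower

-- generator: the yielded lines, in order
def find_warnings (content : List String) : List String :=
  content.foldl (fun acc l =>
    let lower := PySem.Str.lower (PySem.Str.strip l)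
    if !(PySem.Str.startswith lower "lvm2") then
      if pvKeywordsA.any (fun k => PySem.Str.isIn k lower) then acc ++ [l] else acc
    else acc) []

-- ===== PORT B =====
def pvKeywordsB : List String :=
  ["warning", "couldn't find device", "configuration setting", "read failed",
   "was device resized?", "invalid argument", "leaked on lvs", "checksum error",
   "is exported", "failed.", "invalid metadata", "response failed", "duplicate",
   "not found", "missing device", "internal error", "input/output error",
   "incorrect metadata", "cannot process volume", "no such file or directory",
   "logging initialised", "changed sizes", "vsnprintf failed", "write failed",
   "correction failed", "failed to write", "couldn't read", "marked missing",
   "attempt to close device", "ignoring supplied major", "not match metadata",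
   "reading vg", "error reading device"]

-- _BY_FIRST: keywords indexed by first character (_k[0] ported as headD; every
-- keyword is a non-empty ASCII literal, so the default is never used — exact)
def pvByFirst : PySem.Dict Char (List (List Char)) :=
  (pvKeywordsB.map String.toList).foldl (fun d k =>
    d.insert (k.headD ' ') (d.getD (k.headD ' ') [] ++ [k]))
    PySem.Dict.empty

-- _scan: 'for i, c in enumerate(s): for k in _BY_FIRST.get(c, ()): if
-- s.startswith(k, i)' — exact: the recursion visits the suffixes s.drop i for
-- i = 0, 1, … in order, and s.startswith(k, i) is Chars.startswith (s.drop i) k.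
def pvScan (idx : PySem.Dict Char (List (List Char))) : List Char → Bool
  | [] => false
  | c :: rest =>
      if (idx.getD c []).any (fun k => PySem.Chars.startswith (c :: rest) k) then true
      else pvScan idx rest

def find_warnings_alt (content : List String) : List String :=
  content.foldl (fun acc l =>
    let low := PySem.Str.lower (PySem.Str.strip l)
    if !(PySem.Str.startswith low "lvm2") && pvScan pvByFirst low.toList then
      acc ++ [l] else acc) []

-- ===== PRECONDITION & SPEC =====
def Spec_find_warnings (content : List String) (out : List String) : Prop := out = find_warnings_alt content
instance (content : List String) (out : List String) : Decidable (Spec_find_warnings content out) := by unfold Spec_find_warnings; infer_instance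

-- ===== CLAIM (what is proved, stated in full; the proofs are below) =====
def Claim_equal_find_warnings : Prop := ∀ (content : List String), Dom_find_warnings content → Spec_find_warnings content (find_warnings content)

-- ===== LEMMAS AND PROOFS =====

-- the grouping fold: looking up c yields exactly the keywords whose head is c
theorem pvGroup_getD (ks : List (List Char)) (d : PySem.Dict Char (List (List Char)))
    (c : Char) :
    (ks.foldl (fun d k => d.insert (k.headD ' ') (d.getD (k.headD ' ') [] ++ [k])) d).getD c []
      = d.getD c [] ++ ks.filter (fun k => k.headD ' ' == c) := by
  induction ks generalizing d with
  | nil => simp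
  | cons k t ih =>
      simp only [List.foldl_cons, ih, PySem.Dict.getD_insert, List.filter_cons]
      by_cases h : k.headD ' ' == c
      · rw [if_pos (beq_iff_eq.mp h).symm, if_pos h, beq_iff_eq.mp h, List.append_assoc,
          List.singleton_append]
      · rw [if_neg (fun hc => h (beq_iff_eq.mpr hc.symm)), if_neg h]

theorem pvKeywordsB_ne_nil : ∀ k ∈ pvKeywordsB.map String.toList, k ≠ [] := by
  decide

-- at one position, trying only the keywords indexed under the first character
-- is the same as trying all keywords
theorem pvByFirst_any (c : Char) (rest : List Char) :
    (pvByFirst.getD c []).any (fun k => PySem.Chars.startswith (c :: rest) k)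
      = (pvKeywordsB.map String.toList).any (fun k => PySem.Chars.startswith (c :: rest) k) := by
  rw [pvByFirst, pvGroup_getD]
  rw [show (PySem.Dict.empty : PySem.Dict Char (List (List Char))).getD c [] = [] from rfl,
    List.nil_append, List.any_filter]
  apply PySem.List.any_congr_mem
  intro k hk
  cases hq : PySem.Chars.startswith (c :: rest) k with
  | false => simp
  | true =>
      have hpre := (PySem.Chars.startswith_iff (c :: rest) k).mp hq
      rcases k with _ | ⟨a, k'⟩
      · exact absurd rfl (pvKeywordsB_ne_nil [] hk)
      · obtain ⟨rfl, -⟩ := List.cons_prefix_cons.mp hpre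
        simp

-- the indexed positional scan finds a keyword iff some keyword is a substring
theorem pvScan_eq_any_isIn (cs : List Char) :
    pvScan pvByFirst cs
      = (pvKeywordsB.map String.toList).any (fun k => PySem.Chars.isIn k cs) := by
  induction cs with
  | nil =>
      refine (List.any_eq_false.mpr fun k hk h => ?_).symm
      have := (PySem.Chars.isIn_iff_infix k []).mp h
      exact pvKeywordsB_ne_nil k hk (List.infix_nil.mp this)
  | cons c rest ih =>
      simp only [pvScan, ih, pvByFirst_any]
      cases h : (pvKeywordsB.map String.toList).any
          (fun k => PySem.Chars.startswith (c :: rest) k) with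
      | true =>
          rw [if_pos rfl]
          obtain ⟨k, hk, hpre⟩ := List.any_eq_true.mp h
          refine (List.any_eq_true.mpr ⟨k, hk, ?_⟩).symm
          exact (PySem.Chars.isIn_iff_infix k (c :: rest)).mpr
            ((PySem.Chars.startswith_iff (c :: rest) k).mp hpre).isInfix
      | false =>
          rw [if_neg Bool.false_ne_true, Bool.eq_iff_iff]
          simp only [List.any_eq_true]
          constructor
          · rintro ⟨k, hk, hin⟩
            refine ⟨k, hk, (PySem.Chars.isIn_iff_infix k (c :: rest)).mpr ?_⟩
            exact ((PySem.Chars.isIn_iff_infix k rest).mp hin).trans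
              (List.suffix_cons c rest).isInfix
          · rintro ⟨k, hk, hin⟩
            refine ⟨k, hk, (PySem.Chars.isIn_iff_infix k rest).mpr ?_⟩
            rcases List.infix_cons_iff.mp ((PySem.Chars.isIn_iff_infix k (c :: rest)).mp hin)
              with hpre | hinf
            · exact absurd ((PySem.Chars.startswith_iff (c :: rest) k).mpr hpre)
                (List.any_eq_false.mp h k hk)
            · exact hinf

theorem pvKeywords_agree : pvKeywordsA = pvKeywordsB := by
  decide

-- ===== VERDICT (by name: the statement is the Claim_ definition above) =====
theorem find_warnings_spec : Claim_equal_find_warnings := by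
  intro content _dom
  unfold Spec_find_warnings find_warnings find_warnings_alt
  apply PySem.List.foldl_congr_mem
  intro acc l _
  simp only [pvScan_eq_any_isIn, pvKeywords_agree, List.any_map, Function.comp_def,
    PySem.Str.isIn_eq, PySem.Str.startswith_eq, PySem.Str.toList_lower, PySem.Str.toList_strip]
  generalize PySem.Chars.startswith (PySem.Chars.lower (PySem.Chars.strip l.toList))
    "lvm2".toList = b1
  generalize pvKeywordsB.any (fun k =>
    PySem.Chars.isIn k.toList (PySem.Chars.lower (PySem.Chars.strip l.toList))) = b2
  cases b1 <;> cases b2 <;> simp
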